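-- pv_equiv track=rewrite | github.com/Cautioncrazy/Pokemon-RogueExtract | tools/pbs_generator/generate_pokemon_index.py | compute_evolution_depth
-- ===== SOURCE A (Python) =====
-- from collections import defaultdict, deque
--
-- def compute_evolution_depth(species_id, reverse):
--     """
--     Minimum distance from any root pre-evo.
--     """
--     if not reverse.get(species_id):
--         return 0
--
--     visited = set()
--     q = deque([(species_id, 0)])
--     depths = []
--
--     while q:
--         cur, dist = q.popleft()
--         if (cur, dist) in visited:
--             continue
--         visited.add((cur, dist))
--
--         parents = reverse.get(cur, [])
--         if not parents:
--             depths.append(dist)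
--         else:
--             for p in parents:
--                 q.append((p, dist + 1))
--
--     if not depths:
--         return 0
--     return min(depths)
-- ===== SOURCE B (Python) =====
-- def compute_evolution_depth(species_id, reverse):
--     """
--     Minimum distance from any root pre-evo.
--
--     Level-by-level BFS with a per-node visited set and an early return on
--     the first root reached: the first BFS level containing a node without
--     pre-evolutions is the minimum distance.
--     """
--     visited = {species_id}
--     frontier = [species_id]
--     dist = 0
--     while frontier:
--         nxt = []
--         for cur in frontier:
--             parents = reverse.get(cur, [])
--             if not parents:
--                 return dist
--             for p in parents:
--                 if p not in visited:
--                     visited.add(p)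
--                     nxt.append(p)
--         frontier = nxt
--         dist += 1
--     return 0
-- ===== Notes on version B (the rewrite author's own statement) =====
-- stated objective: alternative
-- what changed: A runs a BFS whose visited set holds (node, depth) PAIRS, re-exploring a node once per distinct depth and finally taking min over all collected root depths; B runs a level-by-level BFS with a per-NODE visited set and returns the level of the first root reached, visiting each node and edge at most once.
import Mathlib
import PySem

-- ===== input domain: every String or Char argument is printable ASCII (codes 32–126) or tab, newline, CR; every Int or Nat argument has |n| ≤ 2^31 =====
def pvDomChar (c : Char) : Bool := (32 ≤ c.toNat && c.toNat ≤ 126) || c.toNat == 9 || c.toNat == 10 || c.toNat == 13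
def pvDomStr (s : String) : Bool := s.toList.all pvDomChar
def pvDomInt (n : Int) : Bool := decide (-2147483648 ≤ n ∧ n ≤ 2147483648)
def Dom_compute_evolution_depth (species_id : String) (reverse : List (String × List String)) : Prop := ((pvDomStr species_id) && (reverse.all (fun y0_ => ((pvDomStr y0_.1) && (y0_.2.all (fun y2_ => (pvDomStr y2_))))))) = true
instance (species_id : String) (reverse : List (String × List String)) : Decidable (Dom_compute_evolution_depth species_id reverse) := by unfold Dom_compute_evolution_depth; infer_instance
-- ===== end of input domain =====

-- B replaces A's pair-visited BFS (which collects every root depth and takes their min)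
-- by a level-by-level BFS with a per-node visited set and an early return on the first
-- root reached (objective: alternative algorithm).


-- shared helper: Python's `reverse.get(x, [])` (and the falsy test `not reverse.get(x)`)
def pvGet (reverse : List (String × List String)) (x : String) : List String :=
  (PySem.Dict.get? (PySem.Dict.mk reverse) x).getD []

-- every node that can ever appear during a traversal (used for the fuel bounds and Pre_)
def pvNodes (species_id : String) (reverse : List (String × List String)) : List String :=
  species_id :: (reverse.map Prod.fst ++ reverse.flatMap Prod.snd)

-- iterated one-step closure of the parent relation (used by Pre_ below)
def pvClo (P : String → List String) : Nat → List String → List String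
  | 0, R => R
  | k+1, R => pvClo P k (PySem.List.dedup (R ++ R.flatMap P))

-- ===== PORT A =====
-- fuel: a safe upper bound on the number of iterations of A's while-loop on the
-- inputs admitted by Pre_ (proved in pvMainA below); the loop stops by itself
def pvFuelA (species_id : String) (reverse : List (String × List String)) : Nat :=
  ((pvNodes species_id reverse).length + 2) ^ 4

def aLoop (reverse : List (String × List String)) (fuel : Nat)
    (q : List (String × Int)) (vis : PySem.Set (String × Int)) (depths : List Int) :
    List Int :=
  match fuel with
  | 0 => depths
  | fuel + 1 =>
    match q with
    | [] => depths
    | (cur, dist) :: q' =>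
      if PySem.Set.contains vis (cur, dist) then aLoop reverse fuel q' vis depths
      else
        let vis' := PySem.Set.add vis (cur, dist)
        let parents := pvGet reverse cur
        if parents = [] then aLoop reverse fuel q' vis' (depths ++ [dist])
        else aLoop reverse fuel (q' ++ parents.map (fun p => (p, dist + 1))) vis' depths

def compute_evolution_depth (species_id : String) (reverse : List (String × List String)) : Int :=
  if pvGet reverse species_id = [] then 0
  else
    let depths := aLoop reverse (pvFuelA species_id reverse) [(species_id, 0)] PySem.Set.empty []
    match PySem.List.min? depths (fun d => d) with
    | none => 0
    | some m => m

-- ===== PORT B =====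
-- inner `for p in parents` loop of Source B
def bAddParents (ps : List String) (vis : PySem.Set String) (nxt : List String) :
    PySem.Set String × List String :=
  match ps with
  | [] => (vis, nxt)
  | p :: rest =>
    if PySem.Set.contains vis p then bAddParents rest vis nxt
    else bAddParents rest (PySem.Set.add vis p) (nxt ++ [p])

-- `for cur in frontier` loop of Source B; none = early `return dist` (a root was reached)
def bScan (reverse : List (String × List String)) (frontier : List String)
    (vis : PySem.Set String) (nxt : List String) :
    Option (PySem.Set String × List String) :=
  match frontier with
  | [] => some (vis, nxt)
  | cur :: rest =>
    let parents := pvGet reverse cur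
    if parents = [] then none
    else
      let r := bAddParents parents vis nxt
      bScan reverse rest r.1 r.2

-- outer `while frontier` loop of Source B; fuel = number of BFS levels, bounded by
-- pvNodes length + 2 on the inputs admitted by Pre_ (proved in pvMainB below)
def bLoop (reverse : List (String × List String)) (fuel : Nat)
    (frontier : List String) (vis : PySem.Set String) (dist : Int) : Int :=
  match fuel with
  | 0 => 0
  | fuel + 1 =>
    if frontier = [] then 0
    else
      match bScan reverse frontier vis [] with
      | none => dist
      | some (vis', nxt') => bLoop reverse fuel nxt' vis' (dist + 1)

def compute_evolution_depth_alt (species_id : String) (reverse : List (String × List String)) : Int :=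
  bLoop reverse ((pvNodes species_id reverse).length + 2) [species_id]
    (PySem.Set.ofList [species_id]) 0

-- ===== PRECONDITION & SPEC =====
-- Pre_: no node reachable from species_id (following parent links) lies on a directed
-- cycle of the parent graph. On exactly the excluded inputs Python A's queue never
-- empties (A diverges, returning nothing), so nothing is claimed there.
def Pre_compute_evolution_depth (species_id : String) (reverse : List (String × List String)) : Prop :=
  ∀ z ∈ pvClo (pvGet reverse) (pvNodes species_id reverse).length [species_id],
    z ∉ pvClo (pvGet reverse) (pvNodes species_id reverse).length (pvGet reverse z)

instance (species_id : String) (reverse : List (String × List String)) :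
    Decidable (Pre_compute_evolution_depth species_id reverse) := by
  unfold Pre_compute_evolution_depth; infer_instance

def pvWitness_compute_evolution_depth : String × (List (String × List String)) :=
  ("PIKACHU", [("PIKACHU", ["PICHU"]), ("PICHU", [])])

def Spec_compute_evolution_depth (species_id : String) (reverse : List (String × List String)) (out : Int) : Prop :=
  out = compute_evolution_depth_alt species_id reverse

instance (species_id : String) (reverse : List (String × List String)) (out : Int) :
    Decidable (Spec_compute_evolution_depth species_id reverse out) := by
  unfold Spec_compute_evolution_depth; infer_instance

-- ===== CLAIM =====
def Claim_equal_compute_evolution_depth : Prop :=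
  ∀ (species_id : String) (reverse : List (String × List String)),
    Dom_compute_evolution_depth species_id reverse →
    Pre_compute_evolution_depth species_id reverse →
    Spec_compute_evolution_depth species_id reverse (compute_evolution_depth species_id reverse)

-- ===== LEMMAS AND PROOFS =====

-- A walk of length d in the parent graph, as an index function.
def pvWalk (P : String → List String) (x y : String) (d : Nat) : Prop :=
  ∃ g : Nat → String, g 0 = x ∧ g d = y ∧ ∀ i, i < d → g (i + 1) ∈ P (g i)

-- lengths of walks from x to some root (node with no parents)
def pvLSet (P : String → List String) (x : String) : Set Nat :=
  {n | ∃ l, P l = [] ∧ pvWalk P x l n}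

noncomputable def pvMinL (P : String → List String) (x : String) : Nat := sInf (pvLSet P x)

def pvReach (P : String → List String) (s y : String) : Prop := ∃ d, pvWalk P s y d

noncomputable def pvDist (P : String → List String) (s y : String) : Nat := sInf {d | pvWalk P s y d}

def pvNoCyc (P : String → List String) (s : String) : Prop :=
  ∀ z d e, pvWalk P s z d → 1 ≤ e → ¬ pvWalk P z z e

-- ambient hypotheses every run-lemma uses: no reachable cycle, and every
-- reachable node has a walk to some root
def pvGood (P : String → List String) (s : String) : Prop :=
  pvNoCyc P s ∧ ∀ y, pvReach P s y → (pvLSet P y).Nonempty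

-- candidate answers readable off a state of A's loop
def pvAns (P : String → List String) (q : List (String × Int))
    (v : PySem.Set (String × Int)) (ds : List Int) : Set Nat :=
  {n | (n : Int) ∈ ds} ∪
  {n | ∃ x, ∃ dn : Nat, ((x, (dn : Int)) ∈ q ∨ (x, (dn : Int)) ∈ v) ∧ n = dn + pvMinL P x}

-- the loop invariant of A's BFS
def pvInvA (s : String) (reverse : List (String × List String))
    (q : List (String × Int)) (v : PySem.Set (String × Int)) (ds : List Int) : Prop :=
  (∀ x d, ((x, d) ∈ q ∨ (x, d) ∈ v) → ∃ dn : Nat, d = (dn : Int) ∧ pvWalk (pvGet reverse) s x dn)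
  ∧ (∀ x (dn : Nat), (x, (dn : Int)) ∈ v → pvGet reverse x ≠ [] →
      ∀ p ∈ pvGet reverse x, (p, (dn : Int) + 1) ∈ q ∨ (p, (dn : Int) + 1) ∈ v)
  ∧ (∀ x (dn : Nat), (x, (dn : Int)) ∈ v → pvGet reverse x = [] → ((dn : Int)) ∈ ds)
  ∧ (∀ m ∈ ds, ∃ n : Nat, m = (n : Int))

-- unprocessed-pair count, the major component of A's termination measure
def pvU (s : String) (reverse : List (String × List String)) (v : PySem.Set (String × Int)) : Nat :=
  (((pvNodes s reverse).toFinset ×ˢ Finset.range ((pvNodes s reverse).length + 1)).filter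
    (fun p => (p.1, (p.2 : Int)) ∉ v)).card


-- ---------- basic walk lemmas ----------

theorem pvWalk_refl (P : String → List String) (x : String) : pvWalk P x x 0 :=
  ⟨fun _ => x, rfl, rfl, fun i hi => absurd hi (Nat.not_lt_zero i)⟩

theorem pvWalk_zero {P : String → List String} {x y : String} (h : pvWalk P x y 0) : x = y := by
  obtain ⟨g, h0, hd, _⟩ := h; rw [← h0, hd]

-- a segment of an index function is a walk
theorem pvWalk_seg {P : String → List String} {g : Nat → String} {d : Nat}
    (hstep : ∀ i, i < d → g (i + 1) ∈ P (g i)) (a b : Nat) (hab : a ≤ b) (hbd : b ≤ d) :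
    pvWalk P (g a) (g b) (b - a) := by
  refine ⟨fun t => g (a + t), ?_, ?_, ?_⟩
  · show g (a + 0) = g a
    rw [Nat.add_zero]
  · show g (a + (b - a)) = g b
    congr 1
    omega
  · intro t ht
    show g (a + (t + 1)) ∈ P (g (a + t))
    have e : a + (t + 1) = (a + t) + 1 := by omega
    rw [e]
    exact hstep (a + t) (by omega)

theorem pvWalk_cons {P : String → List String} {x p y : String} {d : Nat}
    (hp : p ∈ P x) (h : pvWalk P p y d) : pvWalk P x y (d + 1) := by
  obtain ⟨g, h0, hd, hstep⟩ := h
  refine ⟨fun i => if i = 0 then x else g (i - 1), by simp, by simp [hd], ?_⟩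
  intro i hi
  rcases Nat.eq_zero_or_pos i with h0' | h0'
  · subst h0'; simpa [h0] using hp
  · have h1 : ¬ (i + 1 = 0) := by omega
    have h2 : ¬ (i = 0) := by omega
    simp only [h1, h2, if_false]
    have h3 : i - 1 < d := by omega
    have := hstep (i - 1) h3
    have he : i - 1 + 1 = i := by omega
    rwa [he] at this

theorem pvWalk_succ {P : String → List String} {x y : String} {d : Nat}
    (h : pvWalk P x y (d + 1)) : ∃ p ∈ P x, pvWalk P p y d := by
  obtain ⟨g, h0, hd, hstep⟩ := h
  refine ⟨g 1, by rw [← h0]; exact hstep 0 (by omega), fun i => g (i + 1), rfl, hd, ?_⟩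
  intro i hi; exact hstep (i + 1) (by omega)

theorem pvWalk_snoc {P : String → List String} {x c y : String} {d : Nat}
    (h : pvWalk P x c d) (hp : y ∈ P c) : pvWalk P x y (d + 1) := by
  obtain ⟨g, h0, hd, hstep⟩ := h
  refine ⟨fun i => if i ≤ d then g i else y, by simp [h0], by simp, ?_⟩
  intro i hi
  by_cases hle : i + 1 ≤ d
  · simp only [hle, if_pos (by omega : i ≤ d), if_pos]
    exact hstep i (by omega)
  · have hid : i = d := by omega
    subst hid
    simp only [if_neg (by omega : ¬ (i + 1 ≤ i)), if_pos (le_refl i), hd]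
    exact hp

theorem pvWalk_last {P : String → List String} {x y : String} {d : Nat}
    (h : pvWalk P x y (d + 1)) : ∃ c, pvWalk P x c d ∧ y ∈ P c := by
  obtain ⟨g, h0, hd, hstep⟩ := h
  exact ⟨g d, ⟨g, h0, rfl, fun i hi => hstep i (by omega)⟩, by rw [← hd]; exact hstep d (by omega)⟩

theorem pvWalk_trans {P : String → List String} {x y z : String} {m n : Nat}
    (h1 : pvWalk P x y m) (h2 : pvWalk P y z n) : pvWalk P x z (m + n) := by
  obtain ⟨g1, g10, g1m, g1s⟩ := h1
  obtain ⟨g2, g20, g2n, g2s⟩ := h2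
  refine ⟨fun i => if i ≤ m then g1 i else g2 (i - m), by simp [g10], ?_, ?_⟩
  · by_cases hn : n = 0
    · rw [hn] at g2n
      have hmn : m + n = m := by omega
      show (if m + n ≤ m then g1 (m + n) else g2 (m + n - m)) = z
      rw [hmn]
      simp only [if_pos (le_refl m), g1m]
      rw [← g20]
      exact g2n
    · show (if m + n ≤ m then g1 (m + n) else g2 (m + n - m)) = z
      rw [if_neg (by omega : ¬ (m + n ≤ m))]
      have e : m + n - m = n := by omega
      rw [e, g2n]
  · intro i hi
    show (if i + 1 ≤ m then g1 (i + 1) else g2 (i + 1 - m)) ∈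
      P (if i ≤ m then g1 i else g2 (i - m))
    by_cases h1le : i + 1 ≤ m
    · rw [if_pos h1le, if_pos (by omega : i ≤ m)]
      exact g1s i (by omega)
    · by_cases h2le : i ≤ m
      · have him : i = m := by omega
        subst him
        rw [if_neg h1le, if_pos (le_refl i)]
        have e : i + 1 - i = 1 := by omega
        rw [e, g1m, ← g20]
        have := g2s 0 (by omega)
        simpa using this
      · rw [if_neg h1le, if_neg h2le]
        have e : i + 1 - m = (i - m) + 1 := by omega
        rw [e]
        exact g2s (i - m) (by omega)

theorem pvWalk_g_mem {P : String → List String} {nodes : List String}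
    (hP : ∀ x, ∀ p ∈ P x, p ∈ nodes) {x : String} {d : Nat} {g : Nat → String}
    (h0 : g 0 = x) (hstep : ∀ i, i < d → g (i + 1) ∈ P (g i)) (hx : x ∈ nodes) :
    ∀ i, i ≤ d → g i ∈ nodes := by
  intro i
  induction i with
  | zero => intro _; rwa [h0]
  | succ j ih => intro hj; exact hP _ _ (hstep j (by omega))

theorem pvWalk_end_mem {P : String → List String} {nodes : List String}
    (hP : ∀ x, ∀ p ∈ P x, p ∈ nodes) {x y : String} {d : Nat}
    (hx : x ∈ nodes) (h : pvWalk P x y d) : y ∈ nodes := by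
  obtain ⟨g, h0, hd, hstep⟩ := h
  rw [← hd]; exact pvWalk_g_mem hP h0 hstep hx d (le_refl d)

-- under no-reachable-cycle, walks from s are shorter than the node count
theorem pvWalk_len_lt {P : String → List String} {nodes : List String} {s x : String} {d : Nat}
    (hP : ∀ x, ∀ p ∈ P x, p ∈ nodes) (hs : s ∈ nodes) (hnc : pvNoCyc P s)
    (h : pvWalk P s x d) : d < nodes.length := by
  obtain ⟨g, h0, hd, hstep⟩ := h
  by_contra hge
  push_neg at hge
  have hmem : ∀ i, i ≤ d → g i ∈ nodes := pvWalk_g_mem hP h0 hstep hs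
  have hcard : nodes.toFinset.card < (Finset.range (d + 1)).card := by
    have := List.toFinset_card_le nodes
    simp only [Finset.card_range]
    omega
  obtain ⟨i, hi, j, hj, hne, heq⟩ :=
    Finset.exists_ne_map_eq_of_card_lt_of_maps_to (f := g) hcard
      (fun i hi => List.mem_toFinset.mpr (hmem i (by simpa using hi)))
  have hi' : i < d + 1 := by simpa using hi
  have hj' : j < d + 1 := by simpa using hj
  have key : ∀ a b : Nat, a < b → b ≤ d → g a = g b → False := by
    intro a b hab hbd hgab
    have hcyc : pvWalk P (g a) (g a) (b - a) := by
      have := pvWalk_seg hstep a b (by omega) hbd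
      rwa [← hgab] at this
    have hreach : pvWalk P s (g a) a := by
      have := pvWalk_seg hstep 0 a (by omega) (by omega)
      simpa [h0] using this
    exact hnc (g a) a (b - a) hreach (by omega) hcyc
  rcases lt_or_gt_of_ne hne with hlt | hlt
  · exact key i j hlt (by omega) heq
  · exact key j i hlt (by omega) heq.symm

-- any walk between members of nodes can be shortened below the node count
theorem pvWalk_shorten {P : String → List String} {nodes : List String} {x y : String}
    (hP : ∀ x, ∀ p ∈ P x, p ∈ nodes) (hx : x ∈ nodes) :
    ∀ d, pvWalk P x y d → ∃ d' < nodes.length, pvWalk P x y d' := by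
  intro d
  induction d using Nat.strong_induction_on with
  | _ d ih =>
    intro h
    by_cases hlt : d < nodes.length
    · exact ⟨d, hlt, h⟩
    · obtain ⟨g, h0, hd, hstep⟩ := h
      push_neg at hlt
      have hmem : ∀ i, i ≤ d → g i ∈ nodes := pvWalk_g_mem hP h0 hstep hx
      have hcard : nodes.toFinset.card < (Finset.range (d + 1)).card := by
        have := List.toFinset_card_le nodes
        simp only [Finset.card_range]
        omega
      obtain ⟨i, hi, j, hj, hne, heq⟩ :=
        Finset.exists_ne_map_eq_of_card_lt_of_maps_to (f := g) hcard
          (fun i hi => List.mem_toFinset.mpr (hmem i (by simpa using hi)))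
      have hi' : i < d + 1 := by simpa using hi
      have hj' : j < d + 1 := by simpa using hj
      have key : ∀ a b : Nat, a < b → b ≤ d → g a = g b → ∃ d' < nodes.length, pvWalk P x y d' := by
        intro a b hab hbd hgab
        have hw1 : pvWalk P x (g a) a := by
          have := pvWalk_seg hstep 0 a (by omega) (by omega)
          simpa [h0] using this
        have hw2 : pvWalk P (g b) y (d - b) := by
          have := pvWalk_seg hstep b d hbd (le_refl d)
          rwa [hd] at this
        rw [hgab] at hw1
        have := pvWalk_trans hw1 hw2
        exact ih (a + (d - b)) (by omega) this
      rcases lt_or_gt_of_ne hne with hlt' | hlt'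
      · exact key i j hlt' (by omega) heq
      · exact key j i hlt' (by omega) heq.symm

-- cycle shortening
theorem pvCycShort {P : String → List String} {nodes : List String}
    (hP : ∀ x, ∀ p ∈ P x, p ∈ nodes) :
    ∀ e, 1 ≤ e → ∀ z, z ∈ nodes → pvWalk P z z e →
      ∃ z' e' dz, pvWalk P z z' dz ∧ 1 ≤ e' ∧ e' ≤ nodes.length ∧ pvWalk P z' z' e' := by
  intro e
  induction e using Nat.strong_induction_on with
  | _ e ih =>
    intro he z hz hw
    by_cases hle : e ≤ nodes.length
    · exact ⟨z, e, 0, pvWalk_refl P z, he, hle, hw⟩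
    · push_neg at hle
      obtain ⟨g, h0, hd, hstep⟩ := hw
      have hmem : ∀ i, i ≤ e → g i ∈ nodes := pvWalk_g_mem hP h0 hstep hz
      have hcard : nodes.toFinset.card < (Finset.range e).card := by
        have := List.toFinset_card_le nodes
        simp only [Finset.card_range]
        omega
      obtain ⟨i, hi, j, hj, hne, heq⟩ :=
        Finset.exists_ne_map_eq_of_card_lt_of_maps_to (f := g) hcard
          (fun i hi => List.mem_toFinset.mpr (hmem i (Nat.le_of_lt (by simpa using hi))))
      have hi' : i < e := by simpa using hi
      have hj' : j < e := by simpa using hj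
      have key : ∀ a b : Nat, a < b → b ≤ e - 1 → g a = g b →
          ∃ z' e' dz, pvWalk P z z' dz ∧ 1 ≤ e' ∧ e' ≤ nodes.length ∧ pvWalk P z' z' e' := by
        intro a b hab hbe hgab
        have hcyc : pvWalk P (g a) (g a) (b - a) := by
          have := pvWalk_seg hstep a b (by omega) (by omega)
          rwa [← hgab] at this
        have hza : pvWalk P z (g a) a := by
          have := pvWalk_seg hstep 0 a (by omega) (by omega)
          simpa [h0] using this
        have hga : g a ∈ nodes := hmem a (by omega)
        obtain ⟨z', e', dz, hdz, h1, h2, h3⟩ := ih (b - a) (by omega) (by omega) (g a) hga hcyc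
        exact ⟨z', e', a + dz, pvWalk_trans hza hdz, h1, h2, h3⟩
      rcases lt_or_gt_of_ne hne with hlt' | hlt'
      · exact key i j hlt' (by omega) heq
      · exact key j i hlt' (by omega) heq.symm

-- ---------- closure lemmas (bridge to Pre_) ----------

theorem pvClo_self {P : String → List String} :
    ∀ (k : Nat) (R : List String), ∀ a ∈ R, a ∈ pvClo P k R := by
  intro k
  induction k with
  | zero => intro R a ha; exact ha
  | succ k ih =>
    intro R a ha
    simp only [pvClo]
    exact ih _ a (by rw [PySem.List.mem_dedup]; exact List.mem_append.mpr (Or.inl ha))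

theorem pvClo_complete {P : String → List String} :
    ∀ (d : Nat) (k : Nat) (R : List String) (x y : String), x ∈ R → pvWalk P x y d → d ≤ k →
      y ∈ pvClo P k R := by
  intro d
  induction d with
  | zero =>
    intro k R x y hx hw _
    rw [← pvWalk_zero hw]
    exact pvClo_self k R x hx
  | succ d ih =>
    intro k R x y hx hw hdk
    obtain ⟨k', rfl⟩ : ∃ k', k = k' + 1 := ⟨k - 1, by omega⟩
    obtain ⟨p, hp, hw'⟩ := pvWalk_succ hw
    simp only [pvClo]
    refine ih k' _ p y ?_ hw' (by omega)
    rw [PySem.List.mem_dedup]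
    exact List.mem_append.mpr (Or.inr (List.mem_flatMap.mpr ⟨x, hx, hp⟩))

-- parents of anything are in pvNodes
theorem pvGet_mem_nodes {reverse : List (String × List String)} {s x p : String}
    (hp : p ∈ pvGet reverse x) : p ∈ pvNodes s reverse := by
  unfold pvGet at hp
  cases hg : PySem.Dict.get? (PySem.Dict.mk reverse) x with
  | none => rw [hg] at hp; simp at hp
  | some v =>
    rw [hg] at hp
    simp only [Option.getD_some] at hp
    have hmem : (x, v) ∈ reverse := PySem.Dict.mem_items_of_get?_eq_some _ hg
    unfold pvNodes
    exact List.mem_cons_of_mem _ (List.mem_append.mpr (Or.inr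
      (List.mem_flatMap.mpr ⟨(x, v), hmem, hp⟩)))

theorem pvGet_len_le {reverse : List (String × List String)} {s x : String} :
    (pvGet reverse x).length ≤ (pvNodes s reverse).length := by
  unfold pvGet
  cases hg : PySem.Dict.get? (PySem.Dict.mk reverse) x with
  | none => simp [pvNodes]
  | some v =>
    simp only [Option.getD_some]
    have hmem : (x, v) ∈ reverse := PySem.Dict.mem_items_of_get?_eq_some _ hg
    have hsub : v.Sublist (reverse.flatMap Prod.snd) := by
      have hv : v ∈ reverse.map Prod.snd := List.mem_map.mpr ⟨(x, v), hmem, rfl⟩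
      rw [List.flatMap_def]
      exact List.sublist_flatten_of_mem hv
    have := hsub.length_le
    simp only [pvNodes, List.length_cons, List.length_append]
    omega

theorem pv_s_mem_nodes (s : String) (reverse : List (String × List String)) :
    s ∈ pvNodes s reverse := List.mem_cons_self ..

theorem pvPre_noCyc {species_id : String} {reverse : List (String × List String)}
    (hpre : Pre_compute_evolution_depth species_id reverse) :
    pvNoCyc (pvGet reverse) species_id := by
  intro z d e hwz he hwc
  have hP : ∀ x, ∀ p ∈ pvGet reverse x, p ∈ pvNodes species_id reverse :=
    fun x p hp => pvGet_mem_nodes hp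
  have hs : species_id ∈ pvNodes species_id reverse := pv_s_mem_nodes species_id reverse
  have hz : z ∈ pvNodes species_id reverse := pvWalk_end_mem hP hs hwz
  obtain ⟨z', e', dz, hwz', he', hle', hcyc'⟩ := pvCycShort hP e he z hz hwc
  have hreach : pvWalk (pvGet reverse) species_id z' (d + dz) := pvWalk_trans hwz hwz'
  obtain ⟨d'', hd''lt, hw''⟩ := pvWalk_shorten hP hs (d + dz) hreach
  have hmem1 : z' ∈ pvClo (pvGet reverse) (pvNodes species_id reverse).length [species_id] :=
    pvClo_complete d'' _ [species_id] species_id z' (by simp) hw'' (by omega)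
  obtain ⟨e'', rfl⟩ : ∃ e'', e' = e'' + 1 := ⟨e' - 1, by omega⟩
  obtain ⟨p, hp, hwp⟩ := pvWalk_succ hcyc'
  have hmem2 : z' ∈ pvClo (pvGet reverse) (pvNodes species_id reverse).length (pvGet reverse z') :=
    pvClo_complete e'' _ (pvGet reverse z') p z' hp hwp (by omega)
  exact hpre z' hmem1 hmem2

theorem pvHeadI_mem {α : Type} [Inhabited α] {l : List α} (h : l ≠ []) : l.headI ∈ l := by
  cases l with
  | nil => exact absurd rfl h
  | cons a t => simp [List.headI]

-- every reachable node has a walk to a root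
theorem pvExLeaf {P : String → List String} {nodes : List String} {s : String}
    (hP : ∀ x, ∀ p ∈ P x, p ∈ nodes) (hs : s ∈ nodes) (hnc : pvNoCyc P s) :
    ∀ y, pvReach P s y → (pvLSet P y).Nonempty := by
  intro y hy
  by_contra hno
  rw [Set.not_nonempty_iff_eq_empty] at hno
  have hnoleaf : ∀ l n, pvWalk P y l n → P l ≠ [] := by
    intro l n hw hleaf
    have hmem : n ∈ pvLSet P y := ⟨l, hleaf, hw⟩
    rw [hno] at hmem
    simp at hmem
  obtain ⟨dy, hwy⟩ := hy
  have hyn : y ∈ nodes := pvWalk_end_mem hP hs hwy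
  set h : Nat → String := fun k => Nat.rec y (fun _ z => (P z).headI) k with hh
  have hstep : ∀ k, pvWalk P y (h k) k ∧ h (k + 1) ∈ P (h k) := by
    intro k
    induction k with
    | zero =>
      refine ⟨pvWalk_refl P y, ?_⟩
      have hne : P (h 0) ≠ [] := hnoleaf (h 0) 0 (pvWalk_refl P y)
      exact pvHeadI_mem hne
    | succ k ihk =>
      have hw : pvWalk P y (h (k + 1)) (k + 1) := pvWalk_snoc ihk.1 ihk.2
      refine ⟨hw, ?_⟩
      have hne : P (h (k + 1)) ≠ [] := hnoleaf _ _ hw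
      exact pvHeadI_mem hne
  have hmem : ∀ k, h k ∈ nodes := by
    intro k
    cases k with
    | zero => exact hyn
    | succ k => exact hP _ _ (hstep k).2
  have hcard : nodes.toFinset.card < (Finset.range (nodes.length + 1)).card := by
    have := List.toFinset_card_le nodes
    simp only [Finset.card_range]
    omega
  obtain ⟨i, hi, j, hj, hne, heq⟩ :=
    Finset.exists_ne_map_eq_of_card_lt_of_maps_to (f := h) hcard
      (fun i _ => List.mem_toFinset.mpr (hmem i))
  have hseg : ∀ a b : Nat, pvWalk P (h a) (h (a + b)) b := by
    intro a b
    induction b with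
    | zero => exact pvWalk_refl P (h a)
    | succ b ihb =>
      have e : a + (b + 1) = (a + b) + 1 := by omega
      rw [e]
      exact pvWalk_snoc ihb (hstep (a + b)).2
  have key : ∀ a b : Nat, a < b → h a = h b → False := by
    intro a b hab hgab
    have hcyc : pvWalk P (h a) (h a) (b - a) := by
      have := hseg a (b - a)
      rw [(by omega : a + (b - a) = b)] at this
      rw [← hgab] at this
      exact this
    have hreach : pvWalk P s (h a) (dy + a) := pvWalk_trans hwy (hstep a).1
    exact hnc (h a) (dy + a) (b - a) hreach (by omega) hcyc
  rcases lt_or_gt_of_ne hne with hlt' | hlt'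
  · exact key i j hlt' heq
  · exact key j i hlt' heq.symm

-- ---------- minL lemmas ----------

theorem pvMinL_leaf {P : String → List String} {x : String} (hx : P x = []) :
    pvMinL P x = 0 :=
  Nat.sInf_eq_zero.mpr (Or.inl ⟨x, hx, pvWalk_refl P x⟩)

theorem pvMinL_mem {P : String → List String} {x : String} (h : (pvLSet P x).Nonempty) :
    pvMinL P x ∈ pvLSet P x := Nat.sInf_mem h

theorem pvMinL_le_succ {P : String → List String} {x p : String}
    (hp : p ∈ P x) (h : (pvLSet P p).Nonempty) : pvMinL P x ≤ pvMinL P p + 1 := by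
  obtain ⟨l, hl, hw⟩ := pvMinL_mem h
  exact Nat.sInf_le ⟨l, hl, pvWalk_cons hp hw⟩

theorem pvMinL_succ {P : String → List String} {x : String}
    (hx : P x ≠ []) (h : (pvLSet P x).Nonempty)
    (hall : ∀ p ∈ P x, (pvLSet P p).Nonempty) :
    ∃ p ∈ P x, pvMinL P x = pvMinL P p + 1 := by
  obtain ⟨l, hl, hw⟩ := pvMinL_mem h
  have hm : pvMinL P x ≠ 0 := by
    intro h0
    rw [h0] at hw
    have := pvWalk_zero hw
    rw [this] at hx
    exact hx hl
  obtain ⟨m', hm'⟩ : ∃ m', pvMinL P x = m' + 1 := ⟨pvMinL P x - 1, by omega⟩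
  rw [hm'] at hw
  obtain ⟨p, hp, hw'⟩ := pvWalk_succ hw
  have h1 : pvMinL P p ≤ m' := Nat.sInf_le ⟨l, hl, hw'⟩
  have h2 : pvMinL P x ≤ pvMinL P p + 1 := pvMinL_le_succ hp (hall p hp)
  exact ⟨p, hp, by omega⟩

-- ---------- dist lemmas (B side) ----------

theorem pvDist_walk {P : String → List String} {s y : String} (h : pvReach P s y) :
    pvWalk P s y (pvDist P s y) := Nat.sInf_mem h

theorem pvDist_le {P : String → List String} {s y : String} {d : Nat} (h : pvWalk P s y d) :
    pvDist P s y ≤ d := Nat.sInf_le h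

theorem pvDist_succ_iff {P : String → List String} {s : String} {k : Nat} (y : String) :
    (pvReach P s y ∧ pvDist P s y = k + 1) ↔
      (¬ (pvReach P s y ∧ pvDist P s y ≤ k) ∧
        ∃ c, pvReach P s c ∧ pvDist P s c = k ∧ y ∈ P c) := by
  constructor
  · rintro ⟨hr, hd⟩
    have hw : pvWalk P s y (k + 1) := by rw [← hd]; exact pvDist_walk hr
    obtain ⟨c, hwc, hyc⟩ := pvWalk_last hw
    have hrc : pvReach P s c := ⟨k, hwc⟩
    have hdc : pvDist P s c = k := by
      have h1 : pvDist P s c ≤ k := pvDist_le hwc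
      by_contra hne
      have h2 : pvDist P s c < k := by omega
      have hw2 : pvWalk P s c (pvDist P s c) := pvDist_walk hrc
      have hw3 : pvWalk P s y (pvDist P s c + 1) := pvWalk_snoc hw2 hyc
      have := pvDist_le hw3
      omega
    exact ⟨fun hcon => by omega, c, hrc, hdc, hyc⟩
  · rintro ⟨hnot, c, hrc, hdc, hyc⟩
    have hw : pvWalk P s c k := by rw [← hdc]; exact pvDist_walk hrc
    have hwy : pvWalk P s y (k + 1) := pvWalk_snoc hw hyc
    have hr : pvReach P s y := ⟨k + 1, hwy⟩
    have h1 : pvDist P s y ≤ k + 1 := pvDist_le hwy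
    have h2 : ¬ pvDist P s y ≤ k := fun hc => hnot ⟨hr, hc⟩
    exact ⟨hr, by omega⟩

-- there is a node at every distance up to the distance of a reachable node
theorem pvLevel_nonempty {P : String → List String} {s l : String} {k : Nat}
    (hl : pvReach P s l) (hk : k ≤ pvDist P s l) :
    ∃ z, pvReach P s z ∧ pvDist P s z = k := by
  have hw : pvWalk P s l (pvDist P s l) := pvDist_walk hl
  obtain ⟨g, h0, hd, hstep⟩ := hw
  have hwk : pvWalk P s (g k) k := ⟨g, h0, rfl, fun i hi => hstep i (by omega)⟩
  refine ⟨g k, ⟨k, hwk⟩, ?_⟩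
  have h1 : pvDist P s (g k) ≤ k := pvDist_le hwk
  by_contra hne
  have h2 : pvDist P s (g k) < k := by omega
  have hw2 : pvWalk P s (g k) (pvDist P s (g k)) := pvDist_walk ⟨k, hwk⟩
  have hw3 : pvWalk P (g k) l (pvDist P s l - k) := by
    have := pvWalk_seg hstep k (pvDist P s l) hk (le_refl _)
    rwa [hd] at this
  have := pvDist_le (pvWalk_trans hw2 hw3)
  omega

-- ---------- loop unfolding lemmas ----------

theorem pvALoop_nil (reverse : List (String × List String)) (f : Nat)
    (v : PySem.Set (String × Int)) (ds : List Int) : aLoop reverse f [] v ds = ds := by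
  cases f <;> rfl

theorem pvALoop_cons (reverse : List (String × List String)) (f : Nat) (x : String) (d : Int)
    (q' : List (String × Int)) (v : PySem.Set (String × Int)) (ds : List Int) :
    aLoop reverse (f + 1) ((x, d) :: q') v ds =
      if PySem.Set.contains v (x, d) then aLoop reverse f q' v ds
      else if pvGet reverse x = [] then
        aLoop reverse f q' (PySem.Set.add v (x, d)) (ds ++ [d])
      else
        aLoop reverse f (q' ++ (pvGet reverse x).map (fun p => (p, d + 1)))
          (PySem.Set.add v (x, d)) ds := rfl

theorem pvMemEmpty {α : Type} [BEq α] (x : α) : x ∈ (PySem.Set.empty : PySem.Set α) → False := by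
  intro h
  simp [PySem.Set.empty] at h

-- ---------- B-side scan characterization ----------

theorem pvAdd_char : ∀ (ps : List String) (vis : PySem.Set String) (nxt : List String) (y : String),
    (y ∈ (bAddParents ps vis nxt).1 ↔ y ∈ vis ∨ y ∈ ps) ∧
    (y ∈ (bAddParents ps vis nxt).2 ↔ y ∈ nxt ∨ (y ∉ vis ∧ y ∈ ps)) := by
  intro ps
  induction ps with
  | nil => intro vis nxt y; simp [bAddParents]
  | cons p rest ih =>
    intro vis nxt y
    by_cases hc : PySem.Set.contains vis p = true
    · have hpv : p ∈ vis := (PySem.Set.contains_iff vis p).mp hc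
      have hstep : bAddParents (p :: rest) vis nxt = bAddParents rest vis nxt := by
        simp [bAddParents, hpv]
      rw [hstep]
      obtain ⟨ih1, ih2⟩ := ih vis nxt y
      rw [ih1, ih2]
      constructor
      · rw [List.mem_cons]
        constructor
        · rintro (h | h)
          · exact Or.inl h
          · exact Or.inr (Or.inr h)
        · rintro (h | h | h)
          · exact Or.inl h
          · exact Or.inl (h ▸ hpv)
          · exact Or.inr h
      · rw [List.mem_cons]
        constructor
        · rintro (h | ⟨h1, h2⟩)
          · exact Or.inl h
          · exact Or.inr ⟨h1, Or.inr h2⟩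
        · rintro (h | ⟨h1, h2 | h2⟩)
          · exact Or.inl h
          · exact absurd (h2 ▸ hpv) h1
          · exact Or.inr ⟨h1, h2⟩
    · have hpv : p ∉ vis := fun hm => hc ((PySem.Set.contains_iff vis p).mpr hm)
      have hstep : bAddParents (p :: rest) vis nxt
          = bAddParents rest (PySem.Set.add vis p) (nxt ++ [p]) := by
        simp [bAddParents, hpv]
      rw [hstep]
      obtain ⟨ih1, ih2⟩ := ih (PySem.Set.add vis p) (nxt ++ [p]) y
      rw [ih1, ih2, PySem.Set.mem_add, List.mem_append, List.mem_singleton, List.mem_cons]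
      constructor
      · constructor
        · rintro ((h | h) | h)
          · exact Or.inl h
          · exact Or.inr (Or.inl h)
          · exact Or.inr (Or.inr h)
        · rintro (h | h | h)
          · exact Or.inl (Or.inl h)
          · exact Or.inl (Or.inr h)
          · exact Or.inr h
      · constructor
        · rintro ((h | h) | ⟨h1, h2⟩)
          · exact Or.inl h
          · exact Or.inr ⟨h ▸ hpv, Or.inl h⟩
          · exact Or.inr ⟨fun hv => h1 (Or.inl hv), Or.inr h2⟩
        · rintro (h | ⟨h1, h2 | h2⟩)
          · exact Or.inl (Or.inl h)
          · exact Or.inl (Or.inr h2)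
          · by_cases hyp : y = p
            · exact Or.inl (Or.inr hyp)
            · refine Or.inr ⟨fun hv => ?_, h2⟩
              rcases hv with hv | hv
              · exact h1 hv
              · exact hyp hv

theorem pvScan_none (reverse : List (String × List String)) :
    ∀ (frontier : List String) (vis : PySem.Set String) (nxt : List String),
      bScan reverse frontier vis nxt = none ↔ ∃ c ∈ frontier, pvGet reverse c = [] := by
  intro frontier
  induction frontier with
  | nil => intro vis nxt; simp [bScan]
  | cons c rest ih =>
    intro vis nxt
    by_cases hc : pvGet reverse c = []
    · simp [bScan, hc]
    · have hstep : bScan reverse (c :: rest) vis nxt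
          = bScan reverse rest (bAddParents (pvGet reverse c) vis nxt).1
              (bAddParents (pvGet reverse c) vis nxt).2 := by
        simp [bScan, hc]
      rw [hstep, ih]
      constructor
      · rintro ⟨c', h1, h2⟩
        exact ⟨c', List.mem_cons_of_mem _ h1, h2⟩
      · rintro ⟨c', h1, h2⟩
        rcases List.mem_cons.mp h1 with h1 | h1
        · exact absurd (h1 ▸ h2) hc
        · exact ⟨c', h1, h2⟩

theorem pvScan_some (reverse : List (String × List String)) :
    ∀ (frontier : List String) (vis : PySem.Set String) (nxt : List String)
      (vis' : PySem.Set String) (nxt' : List String),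
      bScan reverse frontier vis nxt = some (vis', nxt') →
      ∀ y, (y ∈ vis' ↔ y ∈ vis ∨ ∃ c ∈ frontier, y ∈ pvGet reverse c) ∧
           (y ∈ nxt' ↔ y ∈ nxt ∨ (y ∉ vis ∧ ∃ c ∈ frontier, y ∈ pvGet reverse c)) := by
  intro frontier
  induction frontier with
  | nil =>
    intro vis nxt vis' nxt' h y
    simp only [bScan, Option.some.injEq, Prod.mk.injEq] at h
    obtain ⟨h1, h2⟩ := h
    subst h1; subst h2
    simp
  | cons c rest ih =>
    intro vis nxt vis' nxt' h y
    by_cases hc : pvGet reverse c = []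
    · simp [bScan, hc] at h
    · have hstep : bScan reverse (c :: rest) vis nxt
          = bScan reverse rest (bAddParents (pvGet reverse c) vis nxt).1
              (bAddParents (pvGet reverse c) vis nxt).2 := by
        simp [bScan, hc]
      rw [hstep] at h
      obtain ⟨ih1, ih2⟩ := ih _ _ vis' nxt' h y
      obtain ⟨ad1, ad2⟩ := pvAdd_char (pvGet reverse c) vis nxt y
      rw [ad1] at ih1
      rw [ad2, ad1] at ih2
      constructor
      · rw [ih1]
        constructor
        · rintro ((h' | h') | ⟨c', h1, h2⟩)
          · exact Or.inl h'
          · exact Or.inr ⟨c, List.mem_cons_self .., h'⟩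
          · exact Or.inr ⟨c', List.mem_cons_of_mem _ h1, h2⟩
        · rintro (h' | ⟨c', h1, h2⟩)
          · exact Or.inl (Or.inl h')
          · rcases List.mem_cons.mp h1 with h1 | h1
            · exact Or.inl (Or.inr (h1 ▸ h2))
            · exact Or.inr ⟨c', h1, h2⟩
      · rw [ih2]
        constructor
        · rintro ((h' | ⟨h1, h2⟩) | ⟨h1, c', h2, h3⟩)
          · exact Or.inl h'
          · exact Or.inr ⟨h1, c, List.mem_cons_self .., h2⟩
          · exact Or.inr ⟨fun hv => h1 (Or.inl hv), c', List.mem_cons_of_mem _ h2, h3⟩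
        · rintro (h' | ⟨h1, c', h2, h3⟩)
          · exact Or.inl (Or.inl h')
          · rcases List.mem_cons.mp h2 with h2 | h2
            · exact Or.inl (Or.inr ⟨h1, h2 ▸ h3⟩)
            · by_cases hyc : y ∈ pvGet reverse c
              · exact Or.inl (Or.inr ⟨h1, hyc⟩)
              · refine Or.inr ⟨fun hv => ?_, c', h2, h3⟩
                rcases hv with hv | hv
                · exact h1 hv
                · exact hyc hv

-- ---------- the A-side measure ----------

theorem pvU_decrease {s : String} {reverse : List (String × List String)}
    {v : PySem.Set (String × Int)} {x : String} {dn : Nat}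
    (hx : x ∈ pvNodes s reverse) (hd : dn < (pvNodes s reverse).length + 1)
    (hnv : (x, (dn : Int)) ∉ v) :
    pvU s reverse (PySem.Set.add v (x, (dn : Int))) < pvU s reverse v := by
  apply Finset.card_lt_card
  have hsub : (((pvNodes s reverse).toFinset ×ˢ Finset.range ((pvNodes s reverse).length + 1)).filter
        (fun p => (p.1, (p.2 : Int)) ∉ PySem.Set.add v (x, (dn : Int)))) ⊆
      (((pvNodes s reverse).toFinset ×ˢ Finset.range ((pvNodes s reverse).length + 1)).filter
        (fun p => (p.1, (p.2 : Int)) ∉ v)) := by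
    intro p hp
    rw [Finset.mem_filter] at hp ⊢
    exact ⟨hp.1, fun hm => hp.2 ((PySem.Set.mem_add v _ _).mpr (Or.inl hm))⟩
  rw [Finset.ssubset_iff_of_subset hsub]
  refine ⟨(x, dn), ?_, ?_⟩
  · rw [Finset.mem_filter]
    exact ⟨Finset.mem_product.mpr ⟨List.mem_toFinset.mpr hx, Finset.mem_range.mpr hd⟩, hnv⟩
  · rw [Finset.mem_filter]
    rintro ⟨-, hcon⟩
    exact hcon ((PySem.Set.mem_add v _ _).mpr (Or.inr rfl))

theorem pvU_le (s : String) (reverse : List (String × List String))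
    (v : PySem.Set (String × Int)) :
    pvU s reverse v ≤ (pvNodes s reverse).length * ((pvNodes s reverse).length + 1) := by
  refine le_trans (Finset.card_filter_le _ _) ?_
  rw [Finset.card_product, Finset.card_range]
  exact Nat.mul_le_mul_right _ (List.toFinset_card_le _)

-- ---------- A main lemma ----------

theorem pvMainA (s : String) (reverse : List (String × List String))
    (hg : pvGood (pvGet reverse) s) :
    ∀ f q v ds, pvInvA s reverse q v ds →
      (pvAns (pvGet reverse) q v ds).Nonempty →
      pvU s reverse v * ((pvNodes s reverse).length + 2) + q.length + 1 ≤ f →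
      (∀ m ∈ aLoop reverse f q v ds, ∃ n : Nat, m = (n : Int) ∧
          sInf (pvAns (pvGet reverse) q v ds) ≤ n)
      ∧ (∃ n : Nat, (n : Int) ∈ aLoop reverse f q v ds ∧
          n = sInf (pvAns (pvGet reverse) q v ds)) := by
  have hP : ∀ x, ∀ p ∈ pvGet reverse x, p ∈ pvNodes s reverse :=
    fun x p hp => pvGet_mem_nodes hp
  have hs : s ∈ pvNodes s reverse := pv_s_mem_nodes s reverse
  intro f
  induction f using Nat.strong_induction_on with
  | _ f ih =>
    intro q v ds hInv hne hfuel
    unfold pvInvA at hInv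
    obtain ⟨hI1, hI2, hI3, hI0⟩ := hInv
    cases q with
    | nil =>
      rw [pvALoop_nil]
      have hCL : ∀ (M : Nat) (x : String) (dn : Nat), pvMinL (pvGet reverse) x = M →
          (x, (dn : Int)) ∈ v →
          ∃ en : Nat, ((en : Int)) ∈ ds ∧ en ≤ dn + pvMinL (pvGet reverse) x := by
        intro M
        induction M using Nat.strong_induction_on with
        | _ M ihM =>
          intro x dn hM hv
          by_cases hleaf : pvGet reverse x = []
          · refine ⟨dn, hI3 x dn hv hleaf, by omega⟩
          · obtain ⟨dn0, hcast, hwalk⟩ := hI1 x (dn : Int) (Or.inr hv)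
            have hdn : dn0 = dn := by exact_mod_cast hcast.symm
            subst hdn
            have hrx : pvReach (pvGet reverse) s x := ⟨dn0, hwalk⟩
            have hall : ∀ p ∈ pvGet reverse x, (pvLSet (pvGet reverse) p).Nonempty := by
              intro p hp
              exact hg.2 p ⟨dn0 + 1, pvWalk_snoc hwalk hp⟩
            obtain ⟨p, hp, hmeq⟩ := pvMinL_succ hleaf (hg.2 x hrx) hall
            have hv' : (p, ((dn0 + 1 : Nat) : Int)) ∈ v := by
              rcases hI2 x dn0 hv hleaf p hp with h | h
              · exact absurd h (List.not_mem_nil)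
              · have hc : ((dn0 : Int) + 1) = ((dn0 + 1 : Nat) : Int) := by push_cast; ring
                rwa [hc] at h
            obtain ⟨en, hds, hle⟩ :=
              ihM (pvMinL (pvGet reverse) p) (by omega) p (dn0 + 1) rfl hv'
            exact ⟨en, hds, by omega⟩
      constructor
      · intro m hm
        obtain ⟨n, rfl⟩ := hI0 m hm
        exact ⟨n, rfl, Nat.sInf_le (Or.inl hm)⟩
      · have hmem := Nat.sInf_mem hne
        rcases hmem with hmem | hmem
        · exact ⟨sInf (pvAns (pvGet reverse) [] v ds), hmem, rfl⟩
        · obtain ⟨x, dn, hpair, hval⟩ := hmem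
          rcases hpair with hpair | hpair
          · exact absurd hpair (List.not_mem_nil)
          · obtain ⟨en, hds, hle⟩ := hCL (pvMinL (pvGet reverse) x) x dn rfl hpair
            have h1 : sInf (pvAns (pvGet reverse) [] v ds) ≤ en := Nat.sInf_le (Or.inl hds)
            exact ⟨en, hds, by omega⟩
    | cons hd q' =>
      obtain ⟨x, d⟩ := hd
      obtain ⟨f', rfl⟩ : ∃ f', f = f' + 1 := ⟨f - 1, by omega⟩
      obtain ⟨dn, rfl, hwalk⟩ := hI1 x d (Or.inl (List.mem_cons_self ..))
      have hxn : x ∈ pvNodes s reverse := pvWalk_end_mem hP hs hwalk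
      have hdn : dn < (pvNodes s reverse).length := pvWalk_len_lt hP hs hg.1 hwalk
      rw [pvALoop_cons]
      cases hcb : PySem.Set.contains v (x, (dn : Int)) with
      | true =>
        rw [if_pos rfl]
        have hvm : (x, (dn : Int)) ∈ v := (PySem.Set.contains_iff v _).mp hcb
        have hAnsEq : pvAns (pvGet reverse) q' v ds
            = pvAns (pvGet reverse) ((x, (dn : Int)) :: q') v ds := by
          apply Set.ext
          intro n
          constructor
          · rintro (h | ⟨x', dn', hpair, hval⟩)
            · exact Or.inl h
            · refine Or.inr ⟨x', dn', ?_, hval⟩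
              rcases hpair with h | h
              · exact Or.inl (List.mem_cons_of_mem _ h)
              · exact Or.inr h
          · rintro (h | ⟨x', dn', hpair, hval⟩)
            · exact Or.inl h
            · refine Or.inr ⟨x', dn', ?_, hval⟩
              rcases hpair with h | h
              · rcases List.mem_cons.mp h with h | h
                · rw [h]
                  exact Or.inr hvm
                · exact Or.inl h
              · exact Or.inr h
        have hInv' : pvInvA s reverse q' v ds := by
          refine ⟨?_, ?_, hI3, hI0⟩
          · intro x' d' h'
            refine hI1 x' d' ?_
            rcases h' with h' | h'
            · exact Or.inl (List.mem_cons_of_mem _ h')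
            · exact Or.inr h'
          · intro x' dn' hv' hnl p hp
            rcases hI2 x' dn' hv' hnl p hp with h | h
            · rcases List.mem_cons.mp h with h | h
              · rw [h]
                exact Or.inr hvm
              · exact Or.inl h
            · exact Or.inr h
        have hres := ih f' (by omega) q' v ds hInv' (by rw [hAnsEq]; exact hne)
          (by simp only [List.length_cons] at hfuel ⊢; omega)
        rw [← hAnsEq]
        exact hres
      | false =>
        rw [if_neg Bool.false_ne_true]
        have hnv : (x, (dn : Int)) ∉ v := fun hm => by
          rw [(PySem.Set.contains_iff v _).mpr hm] at hcb
          cases hcb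
        have hUdec : pvU s reverse (PySem.Set.add v (x, (dn : Int))) < pvU s reverse v :=
          pvU_decrease hxn (by omega) hnv
        have hUmul : (pvU s reverse (PySem.Set.add v (x, (dn : Int))) + 1)
              * ((pvNodes s reverse).length + 2)
            ≤ pvU s reverse v * ((pvNodes s reverse).length + 2) :=
          Nat.mul_le_mul_right _ (by omega)
        rw [Nat.succ_mul] at hUmul
        by_cases hleaf : pvGet reverse x = []
        · -- root reached: record its depth
          rw [if_pos hleaf]
          have hminL0 : pvMinL (pvGet reverse) x = 0 := pvMinL_leaf hleaf
          have hAnsEq : pvAns (pvGet reverse) q' (PySem.Set.add v (x, (dn : Int)))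
                (ds ++ [(dn : Int)])
              = pvAns (pvGet reverse) ((x, (dn : Int)) :: q') v ds := by
            apply Set.ext
            intro n
            constructor
            · rintro (h | ⟨x', dn', hpair, hval⟩)
              · rcases List.mem_append.mp h with h | h
                · exact Or.inl h
                · rw [List.mem_singleton] at h
                  have : n = dn := by exact_mod_cast h
                  refine Or.inr ⟨x, dn, Or.inl (List.mem_cons_self ..), by omega⟩
              · rcases hpair with h | h
                · exact Or.inr ⟨x', dn', Or.inl (List.mem_cons_of_mem _ h), hval⟩
                · rcases (PySem.Set.mem_add v _ _).mp h with h | h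
                  · exact Or.inr ⟨x', dn', Or.inr h, hval⟩
                  · obtain ⟨h1, h2⟩ := Prod.mk.injEq .. ▸ h
                    have hdd : dn' = dn := by exact_mod_cast h2
                    rw [h1, hdd] at hval
                    exact Or.inr ⟨x, dn, Or.inl (List.mem_cons_self ..), hval⟩
            · rintro (h | ⟨x', dn', hpair, hval⟩)
              · exact Or.inl (List.mem_append.mpr (Or.inl h))
              · rcases hpair with h | h
                · rcases List.mem_cons.mp h with h | h
                  · obtain ⟨h1, h2⟩ := Prod.mk.injEq .. ▸ h
                    have hdd : dn' = dn := by exact_mod_cast h2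
                    rw [h1, hdd] at hval
                    refine Or.inr ⟨x, dn, ?_, hval⟩
                    exact Or.inr ((PySem.Set.mem_add v _ _).mpr (Or.inr rfl))
                  · exact Or.inr ⟨x', dn', Or.inl h, hval⟩
                · exact Or.inr ⟨x', dn',
                    Or.inr ((PySem.Set.mem_add v _ _).mpr (Or.inl h)), hval⟩
          have hInv' : pvInvA s reverse q' (PySem.Set.add v (x, (dn : Int)))
              (ds ++ [(dn : Int)]) := by
            refine ⟨?_, ?_, ?_, ?_⟩
            · intro x' d' h'
              rcases h' with h' | h'
              · exact hI1 x' d' (Or.inl (List.mem_cons_of_mem _ h'))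
              · rcases (PySem.Set.mem_add v _ _).mp h' with h' | h'
                · exact hI1 x' d' (Or.inr h')
                · obtain ⟨h1, h2⟩ := Prod.mk.injEq .. ▸ h'
                  rw [h1, h2]
                  exact ⟨dn, rfl, hwalk⟩
            · intro x' dn' hv' hnl p hp
              rcases (PySem.Set.mem_add v _ _).mp hv' with hv' | hv'
              · rcases hI2 x' dn' hv' hnl p hp with h | h
                · rcases List.mem_cons.mp h with h | h
                  · rw [h]
                    exact Or.inr ((PySem.Set.mem_add v _ _).mpr (Or.inr rfl))
                  · exact Or.inl h
                · exact Or.inr ((PySem.Set.mem_add v _ _).mpr (Or.inl h))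
              · obtain ⟨h1, h2⟩ := Prod.mk.injEq .. ▸ hv'
                rw [h1] at hnl
                exact absurd hleaf hnl
            · intro x' dn' hv' hl
              rcases (PySem.Set.mem_add v _ _).mp hv' with hv' | hv'
              · exact List.mem_append.mpr (Or.inl (hI3 x' dn' hv' hl))
              · obtain ⟨h1, h2⟩ := Prod.mk.injEq .. ▸ hv'
                rw [h2]
                exact List.mem_append.mpr (Or.inr (List.mem_singleton.mpr rfl))
            · intro m hm
              rcases List.mem_append.mp hm with hm | hm
              · exact hI0 m hm
              · rw [List.mem_singleton] at hm
                exact ⟨dn, hm⟩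
          have hres := ih f' (by omega) q' (PySem.Set.add v (x, (dn : Int)))
            (ds ++ [(dn : Int)]) hInv' (by rw [hAnsEq]; exact hne)
            (by simp only [List.length_cons] at hfuel; omega)
          rw [← hAnsEq]
          exact hres
        · -- expand: enqueue all parents at depth + 1
          rw [if_neg hleaf]
          have hrx : pvReach (pvGet reverse) s x := ⟨dn, hwalk⟩
          have hall : ∀ p ∈ pvGet reverse x, (pvLSet (pvGet reverse) p).Nonempty := by
            intro p hp
            exact hg.2 p ⟨dn + 1, pvWalk_snoc hwalk hp⟩
          set q'' := q' ++ (pvGet reverse x).map (fun p => (p, (dn : Int) + 1)) with hq''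
          set v' := PySem.Set.add v (x, (dn : Int)) with hv'
          set A := pvAns (pvGet reverse) ((x, (dn : Int)) :: q') v ds with hA
          set A' := pvAns (pvGet reverse) q'' v' ds with hA'
          have hkeyA : dn + pvMinL (pvGet reverse) x ∈ A :=
            Or.inr ⟨x, dn, Or.inl (List.mem_cons_self ..), rfl⟩
          have hsub : A ⊆ A' := by
            rintro n (h | ⟨x', dn', hpair, hval⟩)
            · exact Or.inl h
            · refine Or.inr ⟨x', dn', ?_, hval⟩
              rcases hpair with h | h
              · rcases List.mem_cons.mp h with h | h
                · rw [h]
                  exact Or.inr ((PySem.Set.mem_add v _ _).mpr (Or.inr rfl))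
                · exact Or.inl (List.mem_append.mpr (Or.inl h))
              · exact Or.inr ((PySem.Set.mem_add v _ _).mpr (Or.inl h))
          have hnew : ∀ n ∈ A', n ∈ A ∨ ∃ p ∈ pvGet reverse x,
              n = (dn + 1) + pvMinL (pvGet reverse) p := by
            rintro n (h | ⟨x', dn', hpair, hval⟩)
            · exact Or.inl (Or.inl h)
            · rcases hpair with h | h
              · rcases List.mem_append.mp h with h | h
                · exact Or.inl (Or.inr ⟨x', dn', Or.inl (List.mem_cons_of_mem _ h), hval⟩)
                · obtain ⟨p, hp, hpe⟩ := List.mem_map.mp h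
                  obtain ⟨h1, h2⟩ := Prod.mk.injEq .. ▸ hpe
                  have hdd : dn' = dn + 1 := by exact_mod_cast h2.symm
                  rw [← h1, hdd] at hval
                  exact Or.inr ⟨p, hp, hval⟩
              · rcases (PySem.Set.mem_add v _ _).mp h with h | h
                · exact Or.inl (Or.inr ⟨x', dn', Or.inr h, hval⟩)
                · obtain ⟨h1, h2⟩ := Prod.mk.injEq .. ▸ h
                  have hdd : dn' = dn := by exact_mod_cast h2
                  rw [h1, hdd] at hval
                  exact Or.inl (Or.inr ⟨x, dn, Or.inl (List.mem_cons_self ..), hval⟩)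
          have hbound : ∀ p ∈ pvGet reverse x,
              dn + pvMinL (pvGet reverse) x ≤ (dn + 1) + pvMinL (pvGet reverse) p := by
            intro p hp
            have := pvMinL_le_succ hp (hall p hp)
            omega
          have hne' : A'.Nonempty := ⟨dn + pvMinL (pvGet reverse) x, hsub hkeyA⟩
          have hInfEq : sInf A' = sInf A := by
            have h1 : sInf A' ≤ sInf A := Nat.sInf_le (hsub (Nat.sInf_mem hne))
            have h2 : sInf A ≤ sInf A' := by
              rcases hnew _ (Nat.sInf_mem hne') with h | ⟨p, hp, hval⟩
              · exact Nat.sInf_le h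
              · have := hbound p hp
                have h3 : sInf A ≤ dn + pvMinL (pvGet reverse) x := Nat.sInf_le hkeyA
                omega
            omega
          have hInv' : pvInvA s reverse q'' v' ds := by
            refine ⟨?_, ?_, ?_, hI0⟩
            · intro x' d' h'
              rcases h' with h' | h'
              · rcases List.mem_append.mp h' with h' | h'
                · exact hI1 x' d' (Or.inl (List.mem_cons_of_mem _ h'))
                · obtain ⟨p, hp, hpe⟩ := List.mem_map.mp h'
                  obtain ⟨h1, h2⟩ := Prod.mk.injEq .. ▸ hpe
                  rw [← h1, ← h2]
                  exact ⟨dn + 1, by push_cast; ring, pvWalk_snoc hwalk hp⟩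
              · rcases (PySem.Set.mem_add v _ _).mp h' with h' | h'
                · exact hI1 x' d' (Or.inr h')
                · obtain ⟨h1, h2⟩ := Prod.mk.injEq .. ▸ h'
                  rw [h1, h2]
                  exact ⟨dn, rfl, hwalk⟩
            · intro x' dn' hvmem hnl p hp
              rcases (PySem.Set.mem_add v _ _).mp hvmem with hvmem | hvmem
              · rcases hI2 x' dn' hvmem hnl p hp with h | h
                · rcases List.mem_cons.mp h with h | h
                  · rw [h]
                    exact Or.inr ((PySem.Set.mem_add v _ _).mpr (Or.inr rfl))
                  · exact Or.inl (List.mem_append.mpr (Or.inl h))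
                · exact Or.inr ((PySem.Set.mem_add v _ _).mpr (Or.inl h))
              · obtain ⟨h1, h2⟩ := Prod.mk.injEq .. ▸ hvmem
                rw [h1] at hp
                refine Or.inl (List.mem_append.mpr (Or.inr ?_))
                exact List.mem_map.mpr ⟨p, hp, by rw [h2]⟩
            · intro x' dn' hvmem hl
              rcases (PySem.Set.mem_add v _ _).mp hvmem with hvmem | hvmem
              · exact hI3 x' dn' hvmem hl
              · obtain ⟨h1, h2⟩ := Prod.mk.injEq .. ▸ hvmem
                rw [h1] at hl
                exact absurd hl hleaf
          have hlen : (pvGet reverse x).length ≤ (pvNodes s reverse).length :=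
            pvGet_len_le
          have hres := ih f' (by omega) q'' v' ds hInv' hne'
            (by
              simp only [hq'', List.length_append, List.length_map]
              simp only [List.length_cons] at hfuel
              omega)
          rw [hA] at hInfEq ⊢
          rw [← hInfEq]
          exact hres

-- ---------- B main lemma ----------

theorem pvBLoop_succ (reverse : List (String × List String)) (f : Nat)
    (frontier : List String) (vis : PySem.Set String) (dist : Int) :
    bLoop reverse (f + 1) frontier vis dist =
      if frontier = [] then 0
      else
        match bScan reverse frontier vis [] with
        | none => dist
        | some (vis', nxt') => bLoop reverse f nxt' vis' (dist + 1) := rfl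

theorem pvMainB (s : String) (reverse : List (String × List String))
    (hg : pvGood (pvGet reverse) s) :
    ∀ (f : Nat) (k : Nat) (frontier : List String) (vis : PySem.Set String),
      (∀ y, y ∈ frontier ↔ pvReach (pvGet reverse) s y ∧ pvDist (pvGet reverse) s y = k) →
      (∀ y : String, y ∈ vis ↔ pvReach (pvGet reverse) s y ∧ pvDist (pvGet reverse) s y ≤ k) →
      (∀ l, pvReach (pvGet reverse) s l → pvGet reverse l = [] →
        k ≤ pvDist (pvGet reverse) s l) →
      pvMinL (pvGet reverse) s + 1 ≤ f + k →
      bLoop reverse f frontier vis (k : Int) = (pvMinL (pvGet reverse) s : Int) := by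
  intro f
  induction f with
  | zero =>
    intro k frontier vis hF1 hF2 hF3 hfuel
    exfalso
    -- k ≤ minL s, so the fuel bound is contradictory
    obtain ⟨l, hleaf, hw⟩ := pvMinL_mem (hg.2 s ⟨0, pvWalk_refl _ s⟩)
    have hrl : pvReach (pvGet reverse) s l := ⟨_, hw⟩
    have h1 : pvDist (pvGet reverse) s l ≤ pvMinL (pvGet reverse) s := pvDist_le hw
    have h2 : k ≤ pvDist (pvGet reverse) s l := hF3 l hrl hleaf
    omega
  | succ f ih =>
    intro k frontier vis hF1 hF2 hF3 hfuel
    -- a reachable root exists, hence the frontier is nonempty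
    obtain ⟨l, hleaf, hw⟩ := pvMinL_mem (hg.2 s ⟨0, pvWalk_refl _ s⟩)
    have hrl : pvReach (pvGet reverse) s l := ⟨_, hw⟩
    have hdl : pvDist (pvGet reverse) s l ≤ pvMinL (pvGet reverse) s := pvDist_le hw
    have hkl : k ≤ pvDist (pvGet reverse) s l := hF3 l hrl hleaf
    have hkm : k ≤ pvMinL (pvGet reverse) s := le_trans hkl hdl
    obtain ⟨z, hrz, hdz⟩ := pvLevel_nonempty hrl hkl
    have hzf : z ∈ frontier := (hF1 z).mpr ⟨hrz, hdz⟩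
    have hfr : frontier ≠ [] := List.ne_nil_of_mem hzf
    rw [pvBLoop_succ, if_neg hfr]
    cases hscan : bScan reverse frontier vis [] with
    | none =>
      -- a root is in the current frontier: its level is the answer
      obtain ⟨c, hcf, hcl⟩ := (pvScan_none reverse frontier vis []).mp hscan
      obtain ⟨hrc, hdc⟩ := (hF1 c).mp hcf
      have hwc : pvWalk (pvGet reverse) s c k := by
        rw [← hdc]; exact pvDist_walk hrc
      have hle : pvMinL (pvGet reverse) s ≤ k := Nat.sInf_le ⟨c, hcl, hwc⟩
      have : k = pvMinL (pvGet reverse) s := by omega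
      rw [this]
    | some pr =>
      obtain ⟨vis', nxt'⟩ := pr
      have hnol : ¬ ∃ c ∈ frontier, pvGet reverse c = [] := by
        rw [← pvScan_none reverse frontier vis []]
        rw [hscan]
        simp
      -- no root at this level, so the answer is strictly below
      have hkne : k ≠ pvMinL (pvGet reverse) s := by
        intro hkeq
        obtain ⟨l0, hl0leaf, hl0w⟩ := pvMinL_mem (hg.2 s ⟨0, pvWalk_refl _ s⟩)
        have hr0 : pvReach (pvGet reverse) s l0 := ⟨_, hl0w⟩
        have hd1 : pvDist (pvGet reverse) s l0 ≤ pvMinL (pvGet reverse) s := pvDist_le hl0w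
        have hd2 : k ≤ pvDist (pvGet reverse) s l0 := hF3 l0 hr0 hl0leaf
        have hd3 : pvDist (pvGet reverse) s l0 = k := by omega
        exact hnol ⟨l0, (hF1 l0).mpr ⟨hr0, hd3⟩, hl0leaf⟩
      have hchar := pvScan_some reverse frontier vis [] vis' nxt' hscan
      have hF1' : ∀ y, y ∈ nxt' ↔ pvReach (pvGet reverse) s y ∧
          pvDist (pvGet reverse) s y = k + 1 := by
        intro y
        have h2 := (hchar y).2
        simp only [List.not_mem_nil, false_or] at h2
        rw [h2, pvDist_succ_iff y]
        constructor
        · rintro ⟨hnv, c, hcf, hyc⟩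
          obtain ⟨hrc, hdc⟩ := (hF1 c).mp hcf
          exact ⟨fun hcon => hnv ((hF2 y).mpr hcon), c, hrc, hdc, hyc⟩
        · rintro ⟨hnv, c, hrc, hdc, hyc⟩
          exact ⟨fun hcon => hnv ((hF2 y).mp hcon), c, (hF1 c).mpr ⟨hrc, hdc⟩, hyc⟩
      have hF2' : ∀ y : String, y ∈ vis' ↔ pvReach (pvGet reverse) s y ∧
          pvDist (pvGet reverse) s y ≤ k + 1 := by
        intro y
        rw [(hchar y).1]
        constructor
        · rintro (h | ⟨c, hcf, hyc⟩)
          · obtain ⟨hr, hd⟩ := (hF2 y).mp h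
            exact ⟨hr, by omega⟩
          · obtain ⟨hrc, hdc⟩ := (hF1 c).mp hcf
            have hwc : pvWalk (pvGet reverse) s c k := by
              rw [← hdc]; exact pvDist_walk hrc
            have hwy : pvWalk (pvGet reverse) s y (k + 1) := pvWalk_snoc hwc hyc
            exact ⟨⟨k + 1, hwy⟩, pvDist_le hwy⟩
        · rintro ⟨hr, hd⟩
          by_cases hdk : pvDist (pvGet reverse) s y ≤ k
          · exact Or.inl ((hF2 y).mpr ⟨hr, hdk⟩)
          · have hdeq : pvDist (pvGet reverse) s y = k + 1 := by omega
            obtain ⟨-, c, hrc, hdc, hyc⟩ := (pvDist_succ_iff y).mp ⟨hr, hdeq⟩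
            exact Or.inr ⟨c, (hF1 c).mpr ⟨hrc, hdc⟩, hyc⟩
      have hF3' : ∀ l, pvReach (pvGet reverse) s l → pvGet reverse l = [] →
          k + 1 ≤ pvDist (pvGet reverse) s l := by
        intro l0 hr0 hleaf0
        have h1 : k ≤ pvDist (pvGet reverse) s l0 := hF3 l0 hr0 hleaf0
        rcases Nat.eq_or_lt_of_le h1 with h2 | h2
        · exfalso
          exact hnol ⟨l0, (hF1 l0).mpr ⟨hr0, h2.symm⟩, hleaf0⟩
        · omega
      have hres := ih (k + 1) nxt' vis' hF1' hF2' hF3' (by omega)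
      have hcast : ((k : Int) + 1) = ((k + 1 : Nat) : Int) := by push_cast; ring
      rw [hcast]
      exact hres

-- ===== VERDICT (by name: the statement is the Claim_ definition above) =====
theorem compute_evolution_depth_spec : Claim_equal_compute_evolution_depth := by
  intro species_id reverse hdom hpre
  unfold Spec_compute_evolution_depth
  have hP : ∀ x, ∀ p ∈ pvGet reverse x, p ∈ pvNodes species_id reverse :=
    fun x p hp => pvGet_mem_nodes hp
  have hs : species_id ∈ pvNodes species_id reverse := pv_s_mem_nodes species_id reverse
  have hnc : pvNoCyc (pvGet reverse) species_id := pvPre_noCyc hpre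
  have hg : pvGood (pvGet reverse) species_id := ⟨hnc, pvExLeaf hP hs hnc⟩
  -- B computes the minimum root distance
  have hdist0 : ∀ y : String, (pvReach (pvGet reverse) species_id y ∧
      pvDist (pvGet reverse) species_id y = 0) ↔ y = species_id := by
    intro y
    constructor
    · rintro ⟨hr, hd⟩
      have hw : pvWalk (pvGet reverse) species_id y 0 := by
        rw [← hd]; exact pvDist_walk hr
      exact (pvWalk_zero hw).symm
    · rintro rfl
      exact ⟨⟨0, pvWalk_refl _ _⟩, Nat.le_zero.mp (pvDist_le (pvWalk_refl _ _))⟩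
  have hminLle : pvMinL (pvGet reverse) species_id + 1
      ≤ (pvNodes species_id reverse).length + 2 := by
    obtain ⟨l, hleaf, hw⟩ := pvMinL_mem (hg.2 species_id ⟨0, pvWalk_refl _ _⟩)
    obtain ⟨d', hd', hw'⟩ := pvWalk_shorten hP hs _ hw
    have : pvMinL (pvGet reverse) species_id ≤ d' := Nat.sInf_le ⟨l, hleaf, hw'⟩
    omega
  have hB : compute_evolution_depth_alt species_id reverse
      = (pvMinL (pvGet reverse) species_id : Int) := by
    unfold compute_evolution_depth_alt
    have h0 : ((0 : Nat) : Int) = (0 : Int) := rfl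
    rw [← h0]
    apply pvMainB species_id reverse hg
    · intro y
      rw [List.mem_singleton, ← hdist0 y]
    · intro y
      rw [PySem.Set.mem_ofList, List.mem_singleton, ← hdist0 y]
      exact and_congr_right (fun _ => by omega)
    · intro l _ _
      exact Nat.zero_le _
    · omega
  rw [hB]
  unfold compute_evolution_depth
  by_cases hroot : pvGet reverse species_id = []
  · rw [if_pos hroot, pvMinL_leaf hroot]
    rfl
  · rw [if_neg hroot]
    show (match PySem.List.min? (aLoop reverse (pvFuelA species_id reverse)
        [(species_id, 0)] PySem.Set.empty []) (fun d => d) with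
      | none => (0 : Int)
      | some m => m) = ((pvMinL (pvGet reverse) species_id : Nat) : Int)
    have hInv : pvInvA species_id reverse [(species_id, 0)] PySem.Set.empty [] := by
      refine ⟨?_, ?_, ?_, ?_⟩
      · intro x d h
        rcases h with h | h
        · rw [List.mem_singleton] at h
          obtain ⟨h1, h2⟩ := Prod.mk.injEq .. ▸ h
          rw [h1, h2]
          exact ⟨0, rfl, pvWalk_refl _ _⟩
        · exact absurd h (fun hc => pvMemEmpty _ hc)
      · intro x dn h
        exact absurd h (fun hc => pvMemEmpty _ hc)
      · intro x dn h
        exact absurd h (fun hc => pvMemEmpty _ hc)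
      · intro m hm
        exact absurd hm (List.not_mem_nil)
    have hne : (pvAns (pvGet reverse) [(species_id, 0)] PySem.Set.empty []).Nonempty := by
      refine ⟨pvMinL (pvGet reverse) species_id, Or.inr ⟨species_id, 0, ?_, by omega⟩⟩
      exact Or.inl (by rw [List.mem_singleton]; rfl)
    have hAns0 : sInf (pvAns (pvGet reverse) [(species_id, 0)] PySem.Set.empty [])
        = pvMinL (pvGet reverse) species_id := by
      have hmem := Nat.sInf_mem hne
      rcases hmem with hmem | hmem
      · exact absurd hmem (List.not_mem_nil)
      · obtain ⟨x, dn, hpair, hval⟩ := hmem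
        rcases hpair with hpair | hpair
        · rw [List.mem_singleton] at hpair
          obtain ⟨h1, h2⟩ := Prod.mk.injEq .. ▸ hpair
          have hdd : dn = 0 := by exact_mod_cast h2
          rw [h1] at hval
          have h3 : sInf (pvAns (pvGet reverse) [(species_id, 0)] PySem.Set.empty [])
              ≤ pvMinL (pvGet reverse) species_id := by
            rcases hne with ⟨n, hn⟩
            refine Nat.sInf_le (Or.inr ⟨species_id, 0, ?_, by omega⟩)
            exact Or.inl (by rw [List.mem_singleton]; rfl)
          omega
        · exact absurd hpair (fun hc => pvMemEmpty _ hc)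
    have hN1 : 1 ≤ (pvNodes species_id reverse).length := by
      unfold pvNodes
      simp
    have hfuel : pvU species_id reverse PySem.Set.empty
          * ((pvNodes species_id reverse).length + 2) + 1 + 1
        ≤ pvFuelA species_id reverse := by
      have h1 := pvU_le species_id reverse PySem.Set.empty
      unfold pvFuelA
      set N := (pvNodes species_id reverse).length
      have h2 : pvU species_id reverse PySem.Set.empty * (N + 2)
          ≤ (N * (N + 1)) * (N + 2) := Nat.mul_le_mul_right _ h1
      have h3 : (N * (N + 1)) * (N + 2) + 2 ≤ (N + 2) ^ 4 := by nlinarith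
      omega
    obtain ⟨hall, n, hnmem, hnval⟩ := pvMainA species_id reverse hg
      (pvFuelA species_id reverse) [(species_id, 0)] PySem.Set.empty [] hInv hne
      (by simpa using hfuel)
    rw [hAns0] at hnval
    subst hnval
    cases hmin : PySem.List.min? (aLoop reverse (pvFuelA species_id reverse)
        [(species_id, 0)] PySem.Set.empty []) (fun d => d) with
    | none =>
      rw [PySem.List.min?_eq_none_iff] at hmin
      rw [hmin] at hnmem
      exact absurd hnmem (List.not_mem_nil)
    | some m =>
      show m = ((pvMinL (pvGet reverse) species_id : Nat) : Int)
      have hm1 : m ∈ aLoop reverse (pvFuelA species_id reverse)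
          [(species_id, 0)] PySem.Set.empty [] := PySem.List.min?_mem hmin
      obtain ⟨n', hn', hge⟩ := hall m hm1
      rw [hAns0] at hge
      have hle : m ≤ ((pvMinL (pvGet reverse) species_id : Nat) : Int) :=
        PySem.List.min?_isMin hmin _ hnmem
      rw [hn']
      have : ((n' : Int)) ≤ ((pvMinL (pvGet reverse) species_id : Nat) : Int) := by
        rw [← hn']
        exact hle
      have hgoal : n' = pvMinL (pvGet reverse) species_id := by
        have h4 : (n' : Int) ≤ (pvMinL (pvGet reverse) species_id : Int) := this
        have h5 : n' ≤ pvMinL (pvGet reverse) species_id := by exact_mod_cast h4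
        omega
      rw [hgoal]
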